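-- pv_equiv track=rewrite | github.com/Jdavidrb/University | 2/estruc-datos/tasks/1/task1.py | obtenerMayorPosicion
-- ===== SOURCE A (Python) =====
-- def obtenerMayorPosicion(cad1, cad2):
--     diccionario_resultado = {}
--     longitud_cad1 = len(cad1)
--
--     for char in cad2:
--         diccionario_resultado[char] = -1
--     for i in range(longitud_cad1 - 1, -1, -1):
--         char = cad1[i]
--         if diccionario_resultado.get(char) == -1:
--             diccionario_resultado[char] = i
--
--     return diccionario_resultado
-- ===== SOURCE B (Python) =====
-- def obtenerMayorPosicion(cad1, cad2):
--     ultima = {}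
--     for i, ch in enumerate(cad1):
--         ultima[ch] = i
--     resultado = {}
--     for ch in cad2:
--         resultado[ch] = ultima.get(ch, -1)
--     return resultado
-- ===== Notes on version B (the rewrite author's own statement) =====
-- stated objective: idiomatic
-- what changed: Replaces A's pre-seeded -1 dict plus conditional reverse index scan of cad1 with a forward enumerate pass that unconditionally records each character's last position, then a simple per-character lookup loop over cad2.
import Mathlib
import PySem

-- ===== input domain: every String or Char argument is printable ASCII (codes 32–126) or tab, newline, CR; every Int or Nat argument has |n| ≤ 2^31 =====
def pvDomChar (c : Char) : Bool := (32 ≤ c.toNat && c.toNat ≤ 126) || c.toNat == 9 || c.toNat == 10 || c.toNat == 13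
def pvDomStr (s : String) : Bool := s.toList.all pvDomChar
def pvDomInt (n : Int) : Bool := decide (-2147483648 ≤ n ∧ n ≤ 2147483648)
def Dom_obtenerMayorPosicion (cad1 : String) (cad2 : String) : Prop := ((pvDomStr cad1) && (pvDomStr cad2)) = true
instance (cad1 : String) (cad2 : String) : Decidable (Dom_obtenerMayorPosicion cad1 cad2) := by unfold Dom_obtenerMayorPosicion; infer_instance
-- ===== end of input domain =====

-- B replaces A's pre-seeded -1 dict and conditional reverse index scan of cad1 with a forward
-- enumerate pass recording last positions, then a per-character lookup loop over cad2 (idiomatic, same cost).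


-- ===== PORT A =====
-- literal port of A: seed every char of cad2 with -1, then walk cad1's indices from
-- len-1 down to 0, setting a key the first time it is still -1.
def obtenerMayorPosicion (cad1 : String) (cad2 : String) : List (String × Int) :=
  let d0 : PySem.Dict String Int :=
    cad2.toList.foldl (fun d ch => d.insert (String.singleton ch) (-1)) PySem.Dict.empty
  let d :=
    (PySem.List.pyRange (PySem.Str.len cad1 - 1) (-1) (-1)).foldl
      (fun d i =>
        match PySem.Str.pyGet? cad1 i with
        | some ch =>
            if d.get? (String.singleton ch) = some (-1) then d.insert (String.singleton ch) i
            else d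
        | none => d)  -- unreachable: i is always a valid index of cad1
      d0
  d.items

-- ===== PORT B =====
-- port of B: one forward enumerate pass records each char's last position (overwrite),
-- then a loop over cad2 looks each char up with default -1.
def obtenerMayorPosicion_alt (cad1 : String) (cad2 : String) : List (String × Int) :=
  let ultima : PySem.Dict String Int :=
    (PySem.List.enumerate cad1.toList).foldl
      (fun d p => d.insert (String.singleton p.2) p.1) PySem.Dict.empty
  let res : PySem.Dict String Int :=
    cad2.toList.foldl
      (fun d ch => d.insert (String.singleton ch) (ultima.getD (String.singleton ch) (-1)))
      PySem.Dict.empty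
  res.items

-- ===== PRECONDITION & SPEC =====
def Spec_obtenerMayorPosicion (cad1 : String) (cad2 : String) (out : List (String × Int)) : Prop := out = obtenerMayorPosicion_alt cad1 cad2
instance (cad1 : String) (cad2 : String) (out : List (String × Int)) : Decidable (Spec_obtenerMayorPosicion cad1 cad2 out) := by unfold Spec_obtenerMayorPosicion; infer_instance

-- ===== CLAIM (what is proved, stated in full; the proofs are below) =====
def Claim_equal_obtenerMayorPosicion : Prop := ∀ (cad1 : String) (cad2 : String), Dom_obtenerMayorPosicion cad1 cad2 → Spec_obtenerMayorPosicion cad1 cad2 (obtenerMayorPosicion cad1 cad2)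

-- ===== LEMMAS AND PROOFS =====

-- "index i of L holds the (single) character of the key k"
def pvHit (L : List Char) (k : String) (i : Int) : Bool :=
  match PySem.List.pyGet? L i with
  | some ch => String.singleton ch == k
  | none => false

-- find? congruence on a list (pointwise equal predicates)
theorem pvFind?_congr {α : Type} (p q : α → Bool) (l : List α)
    (h : ∀ a ∈ l, p a = q a) : l.find? p = l.find? q := by
  induction l with
  | nil => rfl
  | cons x xs ih =>
      simp only [List.find?_cons, h x (by simp)]
      cases q x with
      | true => rfl
      | false => exact ih (fun a ha => h a (by simp [ha]))

-- generic: getD after a fold of inserts keyed/valued by functions of the element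
theorem pvGetD_foldl_insert {β : Type} (l : List β) (keyf : β → String) (valf : β → Int)
    (d : PySem.Dict String Int) (k : String) :
    (l.foldl (fun d b => d.insert (keyf b) (valf b)) d).getD k (-1)
      = (l.reverse.find? (fun b => decide (keyf b = k))).elim (d.getD k (-1)) valf := by
  induction l generalizing d with
  | nil => rfl
  | cons b l ih =>
      simp only [List.foldl_cons, List.reverse_cons, List.find?_append, ih]
      cases hf : l.reverse.find? (fun b => decide (keyf b = k)) with
      | some q => simp [hf]
      | none =>
          simp only [hf, Option.none_or, Option.elim]
          by_cases hk : keyf b = k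
          · simp [hk, PySem.Dict.getD_insert]
          · simp [hk, PySem.Dict.getD_insert, Ne.symm hk]

-- generic: get? after the same fold
theorem pvGet?_foldl_insert {β : Type} (l : List β) (keyf : β → String) (valf : β → Int)
    (d : PySem.Dict String Int) (k : String) :
    (l.foldl (fun d b => d.insert (keyf b) (valf b)) d).get? k
      = (l.reverse.find? (fun b => decide (keyf b = k))).elim (d.get? k) (fun b => some (valf b)) := by
  induction l generalizing d with
  | nil => rfl
  | cons b l ih =>
      simp only [List.foldl_cons, List.reverse_cons, List.find?_append, ih]
      cases hf : l.reverse.find? (fun b => decide (keyf b = k)) with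
      | some q => simp [hf]
      | none =>
          simp only [hf, Option.none_or, Option.elim]
          by_cases hk : keyf b = k
          · simp [hk, PySem.Dict.get?_insert]
          · simp [hk, PySem.Dict.get?_insert, Ne.symm hk]

-- A's reverse-scan loop step (definitionally equal to the lambda in port A)
def pvStepA (cad1 : String) (d : PySem.Dict String Int) (i : Int) : PySem.Dict String Int :=
  match PySem.Str.pyGet? cad1 i with
  | some ch =>
      if d.get? (String.singleton ch) = some (-1) then d.insert (String.singleton ch) i else d
  | none => d

-- A's loop never changes the key list
theorem pvStepA_keys (cad1 : String) (is : List Int) (d : PySem.Dict String Int) :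
    (is.foldl (pvStepA cad1) d).keys = d.keys := by
  induction is generalizing d with
  | nil => rfl
  | cons i is ih =>
      simp only [List.foldl_cons, ih]
      unfold pvStepA
      cases PySem.Str.pyGet? cad1 i with
      | none => rfl
      | some ch =>
          by_cases h : d.get? (String.singleton ch) = some (-1)
          · have hne : d.get? (String.singleton ch) ≠ none := by simp [h]
            have hc : d.contains (String.singleton ch) = true := by
              rw [PySem.Dict.contains_iff_mem_keys]
              by_contra hk
              exact hne ((PySem.Dict.get?_eq_none_iff_not_mem_keys d _).mpr hk)
            simp [h, PySem.Dict.keys_insert_of_contains d _ hc]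
          · simp [h]

-- characterization of A's loop: a key at -1 gets the FIRST index in `is` whose char is it
theorem pvLoopA_get? (cad1 : String) (is : List Int) (hpos : ∀ i ∈ is, 0 ≤ i)
    (d : PySem.Dict String Int) (k : String) :
    (is.foldl (pvStepA cad1) d).get? k
      = match d.get? k with
        | some v =>
            if v = -1 then some ((is.find? (pvHit cad1.toList k)).getD (-1))
            else some v
        | none => none := by
  induction is generalizing d with
  | nil =>
      cases h : d.get? k with
      | none => simp [h]
      | some v => by_cases hv : v = -1 <;> simp [h, hv]
  | cons i is ih =>
      have hi : 0 ≤ i := hpos i (by simp)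
      have hpos' : ∀ j ∈ is, 0 ≤ j := fun j hj => hpos j (by simp [hj])
      simp only [List.foldl_cons]
      rw [ih hpos']
      cases hg : PySem.Str.pyGet? cad1 i with
      | none =>
          have hg' : PySem.List.pyGet? cad1.toList i = none := hg
          have hph : pvHit cad1.toList k i = false := by simp [pvHit, hg']
          simp only [pvStepA, hg, List.find?_cons, hph]
      | some ch =>
          have hg' : PySem.List.pyGet? cad1.toList i = some ch := hg
          by_cases hm : String.singleton ch = k
          · have hph : pvHit cad1.toList k i = true := by simp [pvHit, hg', hm]
            subst hm
            by_cases hd : d.get? (String.singleton ch) = some (-1)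
            · have hne : i ≠ (-1 : Int) := by omega
              simp only [pvStepA, hg, if_pos hd, PySem.Dict.get?_insert, if_pos rfl, hd,
                List.find?_cons, hph, Option.getD_some]
              simp [hne]
            · simp only [pvStepA, hg, if_neg hd]
              cases hdv : d.get? (String.singleton ch) with
              | none => simp
              | some v =>
                  have hv : v ≠ -1 := by
                    intro h; rw [hdv, h] at hd; exact hd rfl
                  simp [hv]
          · have hph : pvHit cad1.toList k i = false := by simp [pvHit, hg', hm]
            have hm' : k ≠ String.singleton ch := fun h => hm h.symm
            simp only [List.find?_cons, hph]
            by_cases hd : d.get? (String.singleton ch) = some (-1)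
            · simp only [pvStepA, hg, if_pos hd, PySem.Dict.get?_insert, if_neg hm']
            · simp only [pvStepA, hg, if_neg hd]

-- the descending index walk range(n-1, -1, -1) is the reversed List.range, cast to Int
theorem pvPyRange_desc (m : Nat) :
    PySem.List.pyRange ((m : Int) - 1) (-1) (-1)
      = List.map (fun x : Nat => (x : Int)) (List.range m).reverse := by
  have h1 : PySem.List.pyRange ((m : Int) - 1) (-1) (-1)
      = List.map (fun k : Nat => (m : Int) - 1 - k) (List.range m) := by
    unfold PySem.List.pyRange
    rw [if_neg (by norm_num)]
    cases m with
    | zero => norm_num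
    | succ n =>
        rw [if_neg (by norm_num), if_pos (by push_cast; omega)]
        have hcnt : ((((n+1:Nat):Int)) - 1 - -1 + -(-1) - 1) / -(-1) = ((n+1 : Nat) : Int) := by
          push_cast; ring_nf; omega
        rw [hcnt, Int.toNat_natCast]
        dsimp only
        apply List.map_congr_left
        intro k _
        push_cast; ring
  rw [h1, List.range_eq_range', List.reverse_range', List.map_map, ← List.range_eq_range']
  apply List.map_congr_left
  intro x hx
  simp only [List.mem_range] at hx
  simp only [Function.comp]
  omega

theorem pvEnumerate_append_singleton {α : Type} (M : List α) (c : α) (s : Int) :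
    PySem.List.enumerate (M ++ [c]) s = PySem.List.enumerate M s ++ [(s + M.length, c)] := by
  induction M generalizing s with
  | nil => simp [PySem.List.enumerate]
  | cons x xs ih =>
      simp only [List.cons_append, PySem.List.enumerate, ih, List.length_cons]
      norm_num
      ring_nf

-- bridge: the descending-range scan of cad1 finds the same index as enumerate's reverse
theorem pvBridge (L : List Char) (k : String) :
    ((PySem.List.pyRange ((L.length : Int) - 1) (-1) (-1)).find? (pvHit L k)).getD (-1)
      = ((PySem.List.enumerate L 0).reverse.find? (fun p =>
          decide (String.singleton p.2 = k))).elim (-1) Prod.fst := by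
  rw [pvPyRange_desc, List.find?_map]
  induction L using List.reverseRecOn with
  | nil => rfl
  | append_singleton M c ih =>
      rw [pvEnumerate_append_singleton, List.length_append, List.length_singleton,
        List.range_succ]
      simp only [List.reverse_append, List.reverse_singleton, List.singleton_append,
        List.find?_cons, Function.comp]
      have hget : PySem.List.pyGet? (M ++ [c]) ((M.length : Nat) : Int) = some c := by
        rw [PySem.List.pyGet?_natCast]
        simp
      have hhit : pvHit (M ++ [c]) k (M.length : Int) = (String.singleton c == k) := by
        simp [pvHit, hget]
      by_cases hm : String.singleton c = k
      · simp [hhit, hm]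
      · have hhit' : pvHit (M ++ [c]) k (M.length : Int) = false := by
          simp [hhit, hm]
        simp only [hhit', decide_eq_true_eq, hm, if_neg, Bool.false_eq_true, decide_false]
        rw [pvFind?_congr _ (pvHit M k ∘ fun x : Nat => (x : Int)) _ ?_]
        · exact ih
        · intro a ha
          simp only [List.mem_reverse, List.mem_range] at ha
          have hga : PySem.List.pyGet? (M ++ [c]) ((a : Nat) : Int)
              = PySem.List.pyGet? M ((a : Nat) : Int) := by
            rw [PySem.List.pyGet?_natCast, PySem.List.pyGet?_natCast,
              List.getElem?_append_left ha]
          simp [pvHit, hga]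

-- elements of the descending walk are nonneg
theorem pvPyRange_desc_nonneg (m : Nat) :
    ∀ i ∈ PySem.List.pyRange ((m : Int) - 1) (-1) (-1), 0 ≤ i := by
  rw [pvPyRange_desc]
  intro i hi
  simp only [List.mem_map] at hi
  obtain ⟨x, _, rfl⟩ := hi
  exact Int.natCast_nonneg x

-- ===== VERDICT (by name: the statement is the Claim_ definition above) =====
theorem obtenerMayorPosicion_spec : Claim_equal_obtenerMayorPosicion := by
  intro cad1 cad2 _
  unfold Spec_obtenerMayorPosicion obtenerMayorPosicion obtenerMayorPosicion_alt
  dsimp only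
  -- names for the four dictionaries
  set C := cad2.toList with hC
  set L := cad1.toList with hL
  have hlen : PySem.Str.len cad1 = (L.length : Int) := by
    simp [PySem.Str.len, PySem.Chars.len, hL]
  set d0 : PySem.Dict String Int :=
    C.foldl (fun d ch => d.insert (String.singleton ch) (-1)) PySem.Dict.empty with hd0
  set ultima : PySem.Dict String Int :=
    (PySem.List.enumerate L).foldl
      (fun d p => d.insert (String.singleton p.2) p.1) PySem.Dict.empty with hult
  set res : PySem.Dict String Int :=
    C.foldl (fun d ch => d.insert (String.singleton ch) (ultima.getD (String.singleton ch) (-1)))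
      PySem.Dict.empty with hres
  have estep : (fun (d : PySem.Dict String Int) (i : Int) =>
      match PySem.Str.pyGet? cad1 i with
      | some ch =>
          if d.get? (String.singleton ch) = some (-1) then d.insert (String.singleton ch) i
          else d
      | none => d) = pvStepA cad1 := rfl
  rw [hlen, estep]
  set Is := PySem.List.pyRange ((L.length : Int) - 1) (-1) (-1) with hIs
  set dA := Is.foldl (pvStepA cad1) d0 with hdA
  -- keys coincide (same insertion order over cad2) and are nodup
  have hkeys0 : d0.keys = PySem.Set.update PySem.Dict.empty.keys (C.map (fun ch => String.singleton ch)) :=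
    PySem.Dict.keys_foldl_insert_key C _ _ _
  have hkeysres : res.keys = PySem.Set.update PySem.Dict.empty.keys (C.map (fun ch => String.singleton ch)) :=
    PySem.Dict.keys_foldl_insert_key C _ _ _
  have hkeysA : dA.keys = d0.keys := pvStepA_keys cad1 Is d0
  have hnodA : dA.keys.Nodup := by
    rw [hkeysA]
    exact PySem.Dict.nodup_keys_foldl_insert_key C _ _ _ PySem.Dict.nodup_keys_empty
  have hnodres : res.keys.Nodup :=
    PySem.Dict.nodup_keys_foldl_insert_key C _ _ _ PySem.Dict.nodup_keys_empty
  rw [PySem.Dict.items_eq_map_keys dA hnodA (-1), PySem.Dict.items_eq_map_keys res hnodres (-1),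
    hkeysA, hkeys0, hkeysres]
  apply List.map_congr_left
  intro k hk
  -- k is the singleton of some character of cad2
  have hkmem : k ∈ C.map (fun ch => String.singleton ch) := by
    rw [PySem.Dict.keys_empty, PySem.Set.update_nil_left] at hk
    exact (PySem.Set.mem_ofList _ _).mp hk
  -- the cad2-scan find? used by both d0 and res is `some`
  have hfind : (C.map (fun ch => String.singleton ch)).reverse.find?
      (fun s => decide (s = k)) ≠ none := by
    rw [Ne, List.find?_eq_none]
    push_neg
    exact ⟨k, by simpa using hkmem, by simp⟩
  -- both folds over cad2 are keyed by `String.singleton`; rephrase via the generic lemmas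
  congr 1
  -- value of A
  have hd0get : d0.get? k = some (-1) := by
    rw [hd0, pvGet?_foldl_insert C (fun ch => String.singleton ch) (fun _ => (-1)) _ k]
    cases hf : C.reverse.find? (fun ch => decide (String.singleton ch = k)) with
    | some q => simp
    | none =>
        exfalso
        apply hfind
        have hf' : C.reverse.find? ((fun s => decide (s = k)) ∘ fun ch => String.singleton ch)
            = none := hf
        rw [← List.map_reverse, List.find?_map, hf']
        rfl
  have hA : dA.getD k (-1) = (Is.find? (pvHit L k)).getD (-1) := by
    rw [PySem.Dict.getD_eq_get?_getD, hdA, pvLoopA_get? cad1 Is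
      (by rw [hIs]; exact pvPyRange_desc_nonneg L.length) d0 k, hd0get]
    rfl
  -- value of B
  have hult' : ultima.getD k (-1)
      = ((PySem.List.enumerate L 0).reverse.find? (fun p =>
          decide (String.singleton p.2 = k))).elim (-1) Prod.fst := by
    rw [hult, pvGetD_foldl_insert (PySem.List.enumerate L) (fun p => String.singleton p.2)
      (fun p => p.1) _ k]
    simp [PySem.Dict.getD_empty]
  have hB : res.getD k (-1) = ultima.getD k (-1) := by
    rw [hres, pvGetD_foldl_insert C (fun ch => String.singleton ch)
      (fun ch => ultima.getD (String.singleton ch) (-1)) _ k]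
    cases hf : C.reverse.find? (fun ch => decide (String.singleton ch = k)) with
    | none =>
        exfalso
        apply hfind
        have hf' : C.reverse.find? ((fun s => decide (s = k)) ∘ fun ch => String.singleton ch)
            = none := hf
        rw [← List.map_reverse, List.find?_map, hf']
        rfl
    | some ch0 =>
        have := List.find?_some hf
        have hch0 : String.singleton ch0 = k := by simpa using this
        simp [hch0]
  rw [hA, hB, hult']
  exact pvBridge L k
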